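-- pv_equiv track=rewrite | github.com/bace1920/oh-my-leetcode | src/problems/44. Wildcard Matching.py | parse
-- ===== SOURCE A (Python) =====
-- def parse(s):
--     result = []
--     current = ''
--     for ch in s:
--         if ch in ['*', '?']:
--             if '' != current:
--                 result.append(current)
--                 current = ''
--             result.append(ch)
--         else:
--             current += ch
--     if '' != current:
--         result.append(current)
--     return result
-- ===== SOURCE B (Python) =====
-- import re
--
-- def parse(s):
--     return re.findall(r'[*?]|[^*?]+', s)
-- ===== Notes on version B (the rewrite author's own statement) =====
-- stated objective: idiomatic
-- what changed: The explicit accumulator loop is replaced by a single regex tokenization re.findall(r'[*?]|[^*?]+', s): each match is either one wildcard character or a maximal run of literals.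
import Mathlib
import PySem

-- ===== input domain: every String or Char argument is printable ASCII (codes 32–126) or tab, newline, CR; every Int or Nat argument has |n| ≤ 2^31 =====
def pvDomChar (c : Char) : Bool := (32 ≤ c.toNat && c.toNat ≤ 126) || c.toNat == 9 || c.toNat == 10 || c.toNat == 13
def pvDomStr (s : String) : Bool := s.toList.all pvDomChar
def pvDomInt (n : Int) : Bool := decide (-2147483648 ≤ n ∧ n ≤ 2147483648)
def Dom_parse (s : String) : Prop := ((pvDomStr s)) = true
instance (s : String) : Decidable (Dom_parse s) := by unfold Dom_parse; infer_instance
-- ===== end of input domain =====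

-- B replaces A's accumulator loop by a regex tokenization (one wildcard char, or a maximal literal run).

-- ===== PORT A =====
-- A's loop, step for step: state (result, current); 'current += ch' is exact as List Char append,
-- strings are rebuilt with String.ofList at the points where A appends 'current' to 'result'.
def parseLoop : List Char → List String → List Char → List String
  | [], result, current =>
      if current ≠ [] then result ++ [String.ofList current] else result
  | ch :: rest, result, current =>
      if ch = '*' ∨ ch = '?' then
        parseLoop rest
          ((if current ≠ [] then result ++ [String.ofList current] else result) ++ [String.ofList [ch]])
          []
      else
        parseLoop rest result (current ++ [ch])

def parse (s : String) : List String := parseLoop s.toList [] []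

-- ===== PORT B =====
-- Source B is 're.findall(r'[*?]|[^*?]+', s)': hand-ported regex semantics for THIS pattern, exact on all
-- strings — at each position the match is either one of '*'/'?' or the maximal run of non-special chars.
def pvSpecial (c : Char) : Bool := c = '*' || c = '?'

def pvTokens : List Char → List String
  | [] => []
  | c :: rest =>
      if pvSpecial c then
        String.ofList [c] :: pvTokens rest
      else
        String.ofList (c :: rest.takeWhile (fun x => !pvSpecial x)) ::
          pvTokens (rest.dropWhile (fun x => !pvSpecial x))
termination_by l => l.length
decreasing_by simp; exact Nat.lt_succ_of_le (List.length_dropWhile_le _ _)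

def parse_alt (s : String) : List String := pvTokens s.toList

-- ===== PRECONDITION & SPEC =====
def Spec_parse (s : String) (out : List String) : Prop := out = parse_alt s
instance (s : String) (out : List String) : Decidable (Spec_parse s out) := by unfold Spec_parse; infer_instance

-- ===== CLAIM (what is proved, stated in full; the proofs are below) =====
def Claim_equal_parse : Prop := ∀ (s : String), Dom_parse s → Spec_parse s (parse s)

-- ===== LEMMAS AND PROOFS =====

-- the accumulated result distributes out of A's loop
theorem parseLoop_acc : ∀ (l : List Char) (cur : List Char) (res₁ res₂ : List String),
    parseLoop l (res₁ ++ res₂) cur = res₁ ++ parseLoop l res₂ cur := by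
  intro l
  induction l with
  | nil => intro cur res₁ res₂; simp [parseLoop]; split <;> simp
  | cons ch rest ih =>
      intro cur res₁ res₂
      simp only [parseLoop]
      split
      · rw [show ((if cur ≠ [] then (res₁ ++ res₂) ++ [String.ofList cur] else res₁ ++ res₂)
              ++ [String.ofList [ch]])
            = res₁ ++ ((if cur ≠ [] then res₂ ++ [String.ofList cur] else res₂)
              ++ [String.ofList [ch]]) from by split <;> simp]
        exact ih [] res₁ _
      · exact ih (cur ++ [ch]) res₁ res₂

theorem takeWhile_all {p : Char → Bool} (cs : List Char) (h : ∀ c ∈ cs, p c = true) :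
    cs.takeWhile p = cs := by
  simpa [List.takeWhile_eq_self_iff] using h

theorem dropWhile_all {p : Char → Bool} (cs : List Char) (h : ∀ c ∈ cs, p c = true) :
    cs.dropWhile p = [] := by
  simpa [List.dropWhile_eq_nil_iff] using h

theorem takeWhile_append_stop {p : Char → Bool} {ch : Char} {rest : List Char}
    (hch : p ch = false) : ∀ (cs : List Char), (∀ c ∈ cs, p c = true) →
    (cs ++ ch :: rest).takeWhile p = cs := by
  intro cs
  induction cs with
  | nil => intro _; simp [hch]
  | cons c cs ih =>
      intro h
      simp only [List.cons_append, List.takeWhile_cons, h c (by simp)]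
      simp [ih (fun x hx => h x (by simp [hx]))]

theorem dropWhile_append_stop {p : Char → Bool} {ch : Char} {rest : List Char}
    (hch : p ch = false) : ∀ (cs : List Char), (∀ c ∈ cs, p c = true) →
    (cs ++ ch :: rest).dropWhile p = ch :: rest := by
  intro cs
  induction cs with
  | nil => intro _; simp [hch]
  | cons c cs ih =>
      intro h
      simp only [List.cons_append, List.dropWhile_cons, h c (by simp)]
      simp [ih (fun x hx => h x (by simp [hx]))]

-- one regex step: a wildcard char is a token by itself
theorem pvTokens_special {ch : Char} {rest : List Char} (hch : pvSpecial ch = true) :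
    pvTokens (ch :: rest) = String.ofList [ch] :: pvTokens rest := by
  rw [pvTokens.eq_def]; simp [hch]

-- one regex step: a maximal literal run ended by a wildcard is one token
theorem pvTokens_run {c ch : Char} {cs rest : List Char}
    (hall : ∀ x ∈ c :: cs, pvSpecial x = false) (hch : pvSpecial ch = true) :
    pvTokens (c :: (cs ++ ch :: rest)) = String.ofList (c :: cs) :: pvTokens (ch :: rest) := by
  rw [pvTokens.eq_def]
  simp [hall c (by simp),
    takeWhile_append_stop (p := fun x => !pvSpecial x) (ch := ch) (rest := rest) (by simp [hch]) cs
      (fun x hx => by simp [hall x (by simp [hx])]),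
    dropWhile_append_stop (p := fun x => !pvSpecial x) (ch := ch) (rest := rest) (by simp [hch]) cs
      (fun x hx => by simp [hall x (by simp [hx])])]

-- a nonempty all-literal suffix tokenizes to the single string it spells
theorem pvTokens_lit {c : Char} {cs : List Char}
    (hall : ∀ x ∈ c :: cs, pvSpecial x = false) :
    pvTokens (c :: cs) = [String.ofList (c :: cs)] := by
  rw [pvTokens.eq_def]
  simp [hall c (by simp),
    takeWhile_all (p := fun x => !pvSpecial x) cs (fun x hx => by simp [hall x (by simp [hx])]),
    dropWhile_all (p := fun x => !pvSpecial x) cs (fun x hx => by simp [hall x (by simp [hx])]),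
    pvTokens]

-- main invariant: A's loop with pending literal buffer cur equals the regex tokens of cur ++ l
theorem parseLoop_tokens (l : List Char) : ∀ (cur : List Char),
    (∀ c ∈ cur, pvSpecial c = false) → parseLoop l [] cur = pvTokens (cur ++ l) := by
  induction l with
  | nil =>
      intro cur hcur
      cases cur with
      | nil => rw [pvTokens.eq_def]; simp [parseLoop]
      | cons c cs => simp [parseLoop, pvTokens_lit hcur]
  | cons ch rest ih =>
      intro cur hcur
      rw [parseLoop]
      by_cases hsp : ch = '*' ∨ ch = '?'
      · have hspb : pvSpecial ch = true := by
          rcases hsp with h | h <;> simp [pvSpecial, h]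
        rw [if_pos hsp,
          show ((if cur ≠ [] then ([] : List String) ++ [String.ofList cur] else [])
              ++ [String.ofList [ch]])
            = ((if cur ≠ [] then [String.ofList cur] else []) ++ [String.ofList [ch]]) ++ []
            from by simp,
          parseLoop_acc rest [] _ [], ih [] (by simp)]
        cases cur with
        | nil => simp [pvTokens_special hspb]
        | cons c cs => simp [pvTokens_run hcur hspb, pvTokens_special hspb]
      · have hspb : pvSpecial ch = false := by
          simp only [pvSpecial, Bool.or_eq_false_iff, decide_eq_false_iff_not]
          push Not at hsp; exact ⟨hsp.1, hsp.2⟩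
        rw [if_neg hsp, ih (cur ++ [ch])
          (by intro x hx
              rcases List.mem_append.1 hx with h | h
              · exact hcur x h
              · simp at h; simp [h, hspb])]
        simp

-- ===== VERDICT (by name: the statement is the Claim_ definition above) =====
theorem parse_spec : Claim_equal_parse := by
  intro s _
  unfold Spec_parse parse parse_alt
  simpa using parseLoop_tokens s.toList [] (by simp)
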